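-- pv_equiv track=rewrite | github.com/ArchivalBoat50/memorable-password-generator | passwordGeneration.py | mneumonicPass
-- ===== SOURCE A (Python) =====
-- replacements2 = (('A', '@'), ('B', '8'))
--
-- replacements3 = ( ('a', '@'), ('T', '7'), ('A', '@'), ('B', '8'), ('F', 'Ph'))
--
-- def mneumonicPass(wordList, complexity):
--     letters = [s[0] for s in wordList]
--     password = "".join(letters)
--
--     if (complexity == 2):
--         for old, new in replacements2:
--             password = password.replace(old, new)
--         return password
--     elif (complexity == 3):
--         for old, new in replacements3:
--             password = password.replace(old, new)
--         return password
--     else: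
--         return password
-- ===== SOURCE B (Python) =====
-- SUBS2 = {'A': '@', 'B': '8'}
-- SUBS3 = {'a': '@', 'T': '7', 'A': '@', 'B': '8', 'F': 'Ph'}
--
-- def mneumonicPass(wordList, complexity):
--     if complexity == 2:
--         table = SUBS2
--     elif complexity == 3:
--         table = SUBS3
--     else:
--         table = {}
--     return ''.join(table.get(s[0], s[0]) for s in wordList)
-- ===== Notes on version B (the rewrite author's own statement) =====
-- stated objective: simpler
-- what changed: Replaces the join-then-sequential-whole-string .replace passes with one per-character table lookup pass: a per-complexity substitution dict is chosen, then the password is built in a single ''.join over the word initials.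
import Mathlib
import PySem

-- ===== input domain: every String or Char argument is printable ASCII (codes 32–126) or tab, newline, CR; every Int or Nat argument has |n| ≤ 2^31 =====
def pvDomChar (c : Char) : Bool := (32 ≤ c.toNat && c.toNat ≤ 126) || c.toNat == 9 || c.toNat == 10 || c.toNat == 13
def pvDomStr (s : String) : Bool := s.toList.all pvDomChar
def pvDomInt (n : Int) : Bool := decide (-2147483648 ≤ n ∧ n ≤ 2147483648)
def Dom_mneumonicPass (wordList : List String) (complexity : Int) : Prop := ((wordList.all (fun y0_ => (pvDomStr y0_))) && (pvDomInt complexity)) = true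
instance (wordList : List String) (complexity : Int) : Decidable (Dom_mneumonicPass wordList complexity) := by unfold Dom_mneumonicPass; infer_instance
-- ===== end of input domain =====

-- B replaces A's join-then-sequential-whole-string-.replace passes by one per-character
-- table-lookup pass; return-value equivalence (neither program mutates its arguments).

-- ===== PORT A =====
-- module constants of A
def replacements2 : List (String × String) := [("A", "@"), ("B", "8")]
def replacements3 : List (String × String) := [("a", "@"), ("T", "7"), ("A", "@"), ("B", "8"), ("F", "Ph")]

-- letters = [s[0] for s in wordList]: s[0] raises IndexError on an empty string,
-- excluded by Pre_; the port drops such strings (nothing is claimed there).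
def mneumonicPass (wordList : List String) (complexity : Int) : String :=
  let letters : List Char := wordList.filterMap (fun s => PySem.Str.pyGet? s 0)
  let password : String := String.ofList letters   -- "".join(letters)
  if complexity = 2 then
    replacements2.foldl (fun pw r => PySem.Str.replace pw r.1 r.2) password
  else if complexity = 3 then
    replacements3.foldl (fun pw r => PySem.Str.replace pw r.1 r.2) password
  else
    password

-- ===== PORT B =====
def SUBS2 : PySem.Dict Char String := PySem.Dict.mk [('A', "@"), ('B', "8")]
def SUBS3 : PySem.Dict Char String := PySem.Dict.mk [('a', "@"), ('T', "7"), ('A', "@"), ('B', "8"), ('F', "Ph")]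

-- ''.join(table.get(s[0], s[0]) for s in wordList); s[0] raises on an empty string
-- (excluded by Pre_), the port drops such strings.
def mneumonicPass_alt (wordList : List String) (complexity : Int) : String :=
  let table : PySem.Dict Char String :=
    if complexity = 2 then SUBS2
    else if complexity = 3 then SUBS3
    else PySem.Dict.mk []
  String.join (wordList.filterMap (fun s =>
    (PySem.Str.pyGet? s 0).map (fun c => table.getD c (String.ofList [c]))))

-- ===== PRECONDITION & SPEC =====
-- Pre_ excludes word lists containing an empty string, on which the Python A raises IndexError at s[0] (B raises there too).
def Pre_mneumonicPass (wordList : List String) (complexity : Int) : Prop :=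
  ∀ s ∈ wordList, s ≠ ""
instance (wordList : List String) (complexity : Int) : Decidable (Pre_mneumonicPass wordList complexity) := by unfold Pre_mneumonicPass; infer_instance

def pvWitness_mneumonicPass : List String × Int := (["Apple", "Tiger", "boat"], 3)

def Spec_mneumonicPass (wordList : List String) (complexity : Int) (out : String) : Prop := out = mneumonicPass_alt wordList complexity
instance (wordList : List String) (complexity : Int) (out : String) : Decidable (Spec_mneumonicPass wordList complexity out) := by unfold Spec_mneumonicPass; infer_instance

-- ===== CLAIM (what is proved, stated in full; the proofs are below) =====
def Claim_equal_mneumonicPass : Prop := ∀ (wordList : List String) (complexity : Int), Dom_mneumonicPass wordList complexity → Pre_mneumonicPass wordList complexity → Spec_mneumonicPass wordList complexity (mneumonicPass wordList complexity)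

-- ===== LEMMAS AND PROOFS =====

-- single-character-pattern replace is a flatMap over the characters
lemma replace_go_single (o : Char) (new : List Char) :
    ∀ (fuel : Nat) (l acc : List Char), l.length ≤ fuel →
      PySem.Chars.replace.go [o] new fuel l acc =
        acc.reverse ++ l.flatMap (fun c => if c = o then new else [c]) := by
  intro fuel
  induction fuel with
  | zero =>
    intro l acc h
    have : l = [] := List.length_eq_zero_iff.mp (Nat.le_zero.mp h)
    subst this
    rw [PySem.Chars.replace.go]; simp
  | succ n ih =>
    intro l acc h
    cases l with
    | nil =>
      rw [PySem.Chars.replace.go]; simp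
      omega
    | cons c t =>
      rw [PySem.Chars.replace.go]
      by_cases hc : c = o
      · subst hc
        have hpre : [c].isPrefixOf (c :: t) = true := by simp [List.isPrefixOf]
        rw [if_pos hpre, show List.drop [c].length (c :: t) = t by simp]
        rw [ih t (new.reverse ++ acc) (Nat.le_of_succ_le_succ (by simpa using h))]
        simp
      · have hpre : [o].isPrefixOf (c :: t) = false := by
          simp [List.isPrefixOf]; exact fun h' => hc h'.symm
        rw [if_neg (by simp [hpre])]
        rw [ih t (c :: acc) (Nat.le_of_succ_le_succ (by simpa using h))]
        simp [hc]

lemma replace_single (s : List Char) (o : Char) (new : List Char) :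
    PySem.Chars.replace s [o] new = s.flatMap (fun c => if c = o then new else [c]) := by
  rw [PySem.Chars.replace]
  rw [if_neg (by simp)]
  simpa using replace_go_single o new s.length s [] le_rfl

lemma join_foldl_toList (a : String) (l : List String) :
    (List.foldl (fun r s => r ++ s) a l).toList = a.toList ++ l.flatMap String.toList := by
  induction l generalizing a with
  | nil => simp
  | cons h t ih => simp [ih]

lemma join_toList (l : List String) :
    (String.join l).toList = l.flatMap String.toList := by
  simpa [String.join] using join_foldl_toList "" l

-- the per-character substitution a table performs
def subFun (table : PySem.Dict Char String) (c : Char) : List Char :=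
  (table.getD c (String.ofList [c])).toList

lemma alt_toList (wordList : List String) (table : PySem.Dict Char String) :
    (String.join (wordList.filterMap (fun s =>
      (PySem.Str.pyGet? s 0).map (fun c => table.getD c (String.ofList [c]))))).toList =
    (wordList.filterMap (fun s => PySem.Str.pyGet? s 0)).flatMap (subFun table) := by
  rw [join_toList, ← List.map_filterMap, List.flatMap_map]
  rfl

lemma subFun_empty (c : Char) : subFun (PySem.Dict.mk []) c = [c] := by
  simp [subFun, PySem.Dict.getD, PySem.Dict.get?]

lemma sub2_char (c : Char) :
    (if c = 'A' then ['@'] else [c]).flatMap (fun d => if d = 'B' then ['8'] else [d])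
      = subFun SUBS2 c := by
  by_cases h1 : c = 'A'
  · subst h1; decide
  · by_cases h2 : c = 'B'
    · subst h2; decide
    · have ha : ('A' == c) = false := by simp [Ne.symm h1]
      have hb : ('B' == c) = false := by simp [Ne.symm h2]
      simp [h1, h2, ha, hb, subFun, SUBS2, PySem.Dict.getD, PySem.Dict.get?, List.find?]

lemma sub3_char (c : Char) :
    (if c = 'a' then ['@'] else [c]).flatMap (fun d =>
      (if d = 'T' then ['7'] else [d]).flatMap (fun e =>
        (if e = 'A' then ['@'] else [e]).flatMap (fun f =>
          (if f = 'B' then ['8'] else [f]).flatMap (fun g =>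
            if g = 'F' then ['P','h'] else [g])))) = subFun SUBS3 c := by
  by_cases h1 : c = 'a'
  · subst h1; decide
  · by_cases h2 : c = 'T'
    · subst h2; decide
    · by_cases h3 : c = 'A'
      · subst h3; decide
      · by_cases h4 : c = 'B'
        · subst h4; decide
        · by_cases h5 : c = 'F'
          · subst h5; decide
          · have g1 : ('a' == c) = false := by simp [Ne.symm h1]
            have g2 : ('T' == c) = false := by simp [Ne.symm h2]
            have g3 : ('A' == c) = false := by simp [Ne.symm h3]
            have g4 : ('B' == c) = false := by simp [Ne.symm h4]
            have g5 : ('F' == c) = false := by simp [Ne.symm h5]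
            simp [h1, h2, h3, h4, h5, g1, g2, g3, g4, g5, subFun, SUBS3,
              PySem.Dict.getD, PySem.Dict.get?, List.find?]

-- ===== VERDICT (by name: the statement is the Claim_ definition above) =====
theorem mneumonicPass_spec : Claim_equal_mneumonicPass := by
  intro wordList complexity _ _
  unfold Spec_mneumonicPass mneumonicPass mneumonicPass_alt
  apply String.toList_injective
  set l : List Char := wordList.filterMap (fun s => PySem.Str.pyGet? s 0) with hl
  by_cases h2 : complexity = 2
  · rw [if_pos h2, if_pos h2, alt_toList]
    simp only [replacements2, List.foldl_cons, List.foldl_nil]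
    rw [PySem.Str.toList_replace, PySem.Str.toList_replace]
    rw [show ("A" : String).toList = ['A'] by decide, show ("@" : String).toList = ['@'] by decide,
        show ("B" : String).toList = ['B'] by decide, show ("8" : String).toList = ['8'] by decide]
    rw [show (String.ofList l).toList = l by simp]
    rw [replace_single, replace_single, List.flatMap_assoc]
    simp only [sub2_char]
    rfl
  · rw [if_neg h2, if_neg h2]
    by_cases h3 : complexity = 3
    · rw [if_pos h3, if_pos h3, alt_toList]
      simp only [replacements3, List.foldl_cons, List.foldl_nil]
      simp only [PySem.Str.toList_replace]
      rw [show ("a" : String).toList = ['a'] by decide, show ("@" : String).toList = ['@'] by decide,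
          show ("T" : String).toList = ['T'] by decide, show ("7" : String).toList = ['7'] by decide,
          show ("A" : String).toList = ['A'] by decide,
          show ("B" : String).toList = ['B'] by decide, show ("8" : String).toList = ['8'] by decide,
          show ("F" : String).toList = ['F'] by decide, show ("Ph" : String).toList = ['P','h'] by decide]
      rw [show (String.ofList l).toList = l by simp]
      rw [replace_single, replace_single, replace_single, replace_single, replace_single]
      simp only [List.flatMap_assoc]
      simp only [sub3_char]
      rfl
    · rw [if_neg h3, if_neg h3, alt_toList,
          show subFun (PySem.Dict.mk []) = fun c => [c] from funext subFun_empty,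
          show (String.ofList l).toList = l by simp, List.flatMap_singleton']
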